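-- pv_equiv track=rewrite | github.com/Iterum-Foods/iterum-chef-notebook | scripts/recipe_splitter.py | clean_recipe_text
-- ===== SOURCE A (Python) =====
-- def clean_recipe_text(text: str) -> str:
--     """Clean up recipe text"""
--     lines = text.split('\n')
--     cleaned_lines = []
--
--     for line in lines:
--         line = line.strip()
--         # Remove empty lines at start/end but keep them in middle
--         if line or cleaned_lines:
--             cleaned_lines.append(line)
--
--     # Remove trailing empty lines
--     while cleaned_lines and not cleaned_lines[-1]:
--         cleaned_lines.pop()
--
--     return '\n'.join(cleaned_lines)
-- ===== SOURCE B (Python) =====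
-- def clean_recipe_text(text: str) -> str:
--     """Clean up recipe text"""
--     stripped = [line.strip() for line in text.split('\n')]
--     n = len(stripped)
--     first = next((i for i in range(n) if stripped[i]), None)
--     if first is None:
--         return ''
--     last = next(i for i in range(n - 1, -1, -1) if stripped[i])
--     return '\n'.join(stripped[first:last + 1])
-- ===== Notes on version B (the rewrite author's own statement) =====
-- stated objective: simpler
-- what changed: Instead of A's conditional-append loop plus a trailing pop-loop, B strips all lines once, finds the first and last non-empty indices, and returns the join of that single slice.
import Mathlib
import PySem

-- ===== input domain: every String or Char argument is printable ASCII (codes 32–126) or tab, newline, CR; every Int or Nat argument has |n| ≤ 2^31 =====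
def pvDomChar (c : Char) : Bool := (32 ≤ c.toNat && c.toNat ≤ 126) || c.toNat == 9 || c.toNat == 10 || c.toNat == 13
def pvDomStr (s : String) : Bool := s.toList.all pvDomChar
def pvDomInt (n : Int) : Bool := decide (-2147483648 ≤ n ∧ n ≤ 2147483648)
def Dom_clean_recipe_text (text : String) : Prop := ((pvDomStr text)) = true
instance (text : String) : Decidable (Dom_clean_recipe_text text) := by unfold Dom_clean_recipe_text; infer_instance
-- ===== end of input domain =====

-- ===== PORT A =====
-- B trims by computing first/last non-empty indices and slicing once, instead of A's
-- conditional-append loop plus trailing pop-loop (objective: simpler).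
-- A-side helper: the `while cleaned_lines and not cleaned_lines[-1]: cleaned_lines.pop()` loop
-- (the test `cleaned_lines and not cleaned_lines[-1]` is exactly `getLast? = some ""`).
def pvPopTrailing (xs : List String) : List String :=
  if h : xs.getLast? = some "" then pvPopTrailing xs.dropLast else xs
termination_by xs.length
decreasing_by
  have hne : xs ≠ [] := by intro he; rw [he] at h; simp at h
  rw [List.length_dropLast]
  have := List.length_pos_iff.mpr hne
  omega

def clean_recipe_text (text : String) : String :=
  -- text.split('\n'): the separator is the non-empty literal "\n", so split? is always `some`
  let lines := (PySem.Str.split? text "\n").getD []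
  let cleaned := lines.foldl (fun cleaned line =>
    let line := PySem.Str.strip line
    if line ≠ "" ∨ cleaned ≠ [] then cleaned ++ [line] else cleaned) []
  PySem.Str.join "\n" (pvPopTrailing cleaned)

-- ===== PORT B =====
def clean_recipe_text_alt (text : String) : String :=
  let stripped := ((PySem.Str.split? text "\n").getD []).map PySem.Str.strip
  let n := stripped.length
  match stripped.findIdx? (fun l => l != "") with
  | none => ""
  | some first =>
    -- `next(i for i in range(n-1,-1,-1) if stripped[i])`: first hit scanning from the back
    let last := n - 1 - stripped.reverse.findIdx (fun l => l != "")
    PySem.Str.join "\n" (PySem.List.slice stripped (some (first : Int)) (some ((last + 1 : Nat) : Int)))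

-- ===== PRECONDITION & SPEC =====
def Spec_clean_recipe_text (text : String) (out : String) : Prop := out = clean_recipe_text_alt text
instance (text : String) (out : String) : Decidable (Spec_clean_recipe_text text out) := by unfold Spec_clean_recipe_text; infer_instance

-- ===== CLAIM (what is proved, stated in full; the proofs are below) =====
def Claim_equal_clean_recipe_text : Prop := ∀ (text : String), Dom_clean_recipe_text text → Spec_clean_recipe_text text (clean_recipe_text text)

-- ===== LEMMAS AND PROOFS =====

-- A's loop with a non-empty accumulator just appends everything.
theorem pv_foldl_ne_nil (S : List String) (acc : List String) (h : acc ≠ []) :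
    S.foldl (fun cleaned line => if line ≠ "" ∨ cleaned ≠ [] then cleaned ++ [line] else cleaned) acc
      = acc ++ S := by
  induction S generalizing acc with
  | nil => simp
  | cons a S ih =>
    simp only [List.foldl_cons]
    rw [if_pos (Or.inr h), ih _ (by simp)]
    simp

-- A's loop from the empty accumulator drops the leading run of empty lines.
theorem pv_foldl_nil (S : List String) :
    S.foldl (fun cleaned line => if line ≠ "" ∨ cleaned ≠ [] then cleaned ++ [line] else cleaned) []
      = S.drop (S.findIdx (fun l => l != "")) := by
  induction S with
  | nil => simp
  | cons a S ih =>
    by_cases ha : a = ""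
    · subst ha
      simp only [List.foldl_cons, List.findIdx_cons]
      rw [if_neg (by simp)]
      simp [ih]
    · have hb : (a != "") = true := by simpa using ha
      simp only [List.foldl_cons, List.findIdx_cons, hb]
      rw [if_pos (Or.inl ha)]
      rw [pv_foldl_ne_nil _ _ (by simp)]
      simp

-- findIdx is ≤ the position of any hit.
theorem pv_findIdx_le {p : String → Bool} {l : List String} {i : Nat} {x : String}
    (h : l[i]? = some x) (hp : p x = true) : l.findIdx p ≤ i := by
  by_contra hc
  push Not at hc
  have hi : i < l.length := (List.getElem?_eq_some_iff.mp h).1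
  have h2 := List.not_of_lt_findIdx hc
  rw [List.getElem?_eq_getElem hi] at h
  have hx : x = l[i] := by injection h with h'; exact h'.symm
  subst hx
  exact Bool.false_ne_true (h2.symm.trans hp)

-- findIdx is unchanged by taking a prefix that still contains the first hit.
theorem pv_findIdx_take (p : String → Bool) (l : List String) (k : Nat)
    (h : l.findIdx p < k) : (l.take k).findIdx p = l.findIdx p := by
  by_cases hk : k ≤ l.length
  · have key := List.findIdx_append (p := p) (l₁ := l.take k) (l₂ := l.drop k)
    rw [List.take_append_drop] at key
    rw [List.length_take, Nat.min_eq_left hk] at key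
    split at key
    · exact key.symm
    · have hle := List.findIdx_le_length (p := p) (xs := l.take k)
      rw [List.length_take, Nat.min_eq_left hk] at hle
      omega
  · rw [List.take_of_length_le (by omega)]

-- The pop-loop in closed form: keep everything before the trailing run of empty lines.
theorem pv_popTrailing_eq (ys : List String) :
    pvPopTrailing ys = ys.take (ys.length - ys.reverse.findIdx (fun l => l != "")) := by
  induction ys using List.reverseRecOn with
  | nil => rw [pvPopTrailing]; simp
  | append_singleton zs l ih =>
    rw [pvPopTrailing]
    by_cases hl : l = ""
    · subst hl
      rw [dif_pos (by simp)]
      have hb : (("" : String) != "") = false := by simp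
      simp only [List.dropLast_concat, List.reverse_append, List.reverse_cons, List.reverse_nil,
        List.nil_append, List.cons_append, List.findIdx_cons, hb, Bool.cond_false]
      rw [ih]
      simp only [List.length_append, List.length_cons, List.length_nil]
      rw [show zs.length + 1 - (List.findIdx (fun l => l != "") zs.reverse + 1)
            = zs.length - List.findIdx (fun l => l != "") zs.reverse by omega]
      rw [List.take_append_of_le_length (by omega)]
    · have hb : (l != "") = true := by simpa using hl
      rw [dif_neg (by simp [hl])]
      simp only [List.reverse_append, List.reverse_cons, List.reverse_nil, List.nil_append,
        List.cons_append, List.findIdx_cons, hb, Bool.cond_true]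
      simp

-- ===== VERDICT (by name: the statement is the Claim_ definition above) =====
theorem clean_recipe_text_spec : Claim_equal_clean_recipe_text := by
  intro text _
  unfold Spec_clean_recipe_text
  simp only [clean_recipe_text, clean_recipe_text_alt]
  generalize (PySem.Str.split? text "\n").getD [] = L
  have hf : L.foldl (fun cleaned line =>
        let line := PySem.Str.strip line
        if line ≠ "" ∨ cleaned ≠ [] then cleaned ++ [line] else cleaned) []
      = (L.map PySem.Str.strip).foldl
          (fun cleaned line => if line ≠ "" ∨ cleaned ≠ [] then cleaned ++ [line] else cleaned) [] :=
    (List.foldl_map (f := PySem.Str.strip)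
      (g := fun cleaned line => if line ≠ "" ∨ cleaned ≠ [] then cleaned ++ [line] else cleaned)
      (l := L) (init := [])).symm
  rw [hf, pv_foldl_nil]
  generalize L.map PySem.Str.strip = S
  cases hfi : S.findIdx? (fun l => l != "") with
  | none =>
    have hall : ∀ x ∈ S, (fun l => l != "") x = false := List.findIdx?_eq_none_iff.mp hfi
    rw [List.findIdx_eq_length.mpr hall, List.drop_length, pv_popTrailing_eq]
    rfl
  | some f =>
    dsimp only
    obtain ⟨hflt, hfeq⟩ := List.findIdx?_eq_some_iff_findIdx_eq.mp hfi
    obtain ⟨hlt, hpf, -⟩ := List.findIdx?_eq_some_iff_getElem.mp hfi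
    -- the reversed list has its first hit no later than position length - 1 - f
    have hrle : S.reverse.findIdx (fun l => l != "") ≤ S.length - 1 - f := by
      apply pv_findIdx_le (x := S[f]'hlt) _ hpf
      rw [List.getElem?_reverse (by omega), show S.length - 1 - (S.length - 1 - f) = f by omega]
      exact List.getElem?_eq_getElem hlt
    have htk : ((S.reverse.take (S.length - f)).findIdx (fun l => l != ""))
        = S.reverse.findIdx (fun l => l != "") :=
      pv_findIdx_take _ _ _ (by omega)
    rw [pv_popTrailing_eq, hfeq, List.reverse_drop, htk,
        PySem.List.slice_natCast, List.length_drop]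
    rw [show S.length - f - List.findIdx (fun l => l != "") S.reverse
          = S.length - 1 - List.findIdx (fun l => l != "") S.reverse + 1 - f from by omega]
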